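-- pv_equiv track=rewrite | github.com/sugamkuchhal/llm_app | ui/answer_adapter.py | resolve_time_from_field_info
-- ===== SOURCE A (Python) =====
-- def resolve_time_from_field_info(field_info, time_hierarchy):
--     """
--     Returns (time_level, column_name) or (None, None), preferring field_info.
--     """
--     if not field_info:
--         return None, None
--
--     ordering = time_hierarchy.get("ordering", [])
--     rank = {level: i for i, level in enumerate(ordering)}
--
--     best = None  # (rank, time_level, name)
--     for f in field_info:
--         if not isinstance(f, dict):
--             continue
--         name = f.get("name")
--         time_level = f.get("time_level")
--         role = f.get("role")
--         if not name or not time_level: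
--             continue
--         if role not in ("dimension", "unknown"):
--             continue
--         r = rank.get(time_level, -1)
--         if best is None or r > best[0]:
--             best = (r, time_level, name)
--
--     if not best:
--         return None, None
--     return best[1], best[2]
-- ===== SOURCE B (Python) =====
-- def resolve_time_from_field_info(field_info, time_hierarchy):
--     """
--     Returns (time_level, column_name) or (None, None), preferring field_info.
--     Collect all valid candidates in one pass, then stable-sort by descending
--     rank and take the top (first-seen wins among equal ranks).
--     """
--     if not field_info:
--         return None, None
--
--     ordering = time_hierarchy.get("ordering", [])
--     rank = {level: i for i, level in enumerate(ordering)}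
--
--     candidates = []
--     for f in field_info:
--         if not isinstance(f, dict):
--             continue
--         name = f.get("name")
--         time_level = f.get("time_level")
--         role = f.get("role")
--         if not name or not time_level:
--             continue
--         if role not in ("dimension", "unknown"):
--             continue
--         candidates.append((rank.get(time_level, -1), time_level, name))
--
--     if not candidates:
--         return None, None
--     candidates.sort(key=lambda t: -t[0])
--     top = candidates[0]
--     return top[1], top[2]
-- ===== Notes on version B (the rewrite author's own statement) =====
-- stated objective: alternative
-- what changed: Replaces the running-max accumulator over field_info with collecting all valid (rank, level, name) candidates and stable-sorting them by descending rank, taking the first element (stability preserves the first-seen tie-break).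
import Mathlib
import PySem

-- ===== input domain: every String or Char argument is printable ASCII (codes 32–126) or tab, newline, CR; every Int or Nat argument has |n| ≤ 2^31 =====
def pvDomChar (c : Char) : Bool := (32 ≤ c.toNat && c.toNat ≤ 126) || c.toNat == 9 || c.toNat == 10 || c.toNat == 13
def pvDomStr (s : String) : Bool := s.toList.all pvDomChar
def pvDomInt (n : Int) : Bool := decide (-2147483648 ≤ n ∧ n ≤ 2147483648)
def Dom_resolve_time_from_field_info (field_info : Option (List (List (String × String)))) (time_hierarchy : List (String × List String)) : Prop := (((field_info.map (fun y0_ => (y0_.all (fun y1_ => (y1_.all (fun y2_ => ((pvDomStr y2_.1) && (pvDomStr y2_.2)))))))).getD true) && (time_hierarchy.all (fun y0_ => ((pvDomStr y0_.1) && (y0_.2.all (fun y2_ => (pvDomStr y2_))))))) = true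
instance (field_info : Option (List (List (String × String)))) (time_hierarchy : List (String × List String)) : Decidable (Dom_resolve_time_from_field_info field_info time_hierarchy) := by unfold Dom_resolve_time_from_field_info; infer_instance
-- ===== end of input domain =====

-- B collects all valid (rank, level, name) candidates in one pass and stable-sorts them by
-- descending rank, taking the top, instead of A's running-max accumulator (objective: alternative).


-- ===== PORT A =====
-- literal port of A: running best = (rank, time_level, name), strict '>' keeps the first maximum
def resolve_time_from_field_info (field_info : Option (List (List (String × String)))) (time_hierarchy : List (String × List String)) : Option String × Option String :=
  match field_info with
  | none => (none, none)                 -- `not field_info`: None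
  | some fs =>
    if fs = [] then (none, none)         -- `not field_info`: empty list
    else
      let ordering := PySem.Dict.getD (PySem.Dict.mk time_hierarchy) "ordering" []
      let rank := (PySem.List.enumerate ordering).foldl
        (fun d p => PySem.Dict.insert d p.2 p.1) PySem.Dict.empty
      let best := fs.foldl (fun (best : Option (Int × String × String)) f =>
        -- every element is a dict under the type convention, so the isinstance check passes
        let fd := PySem.Dict.mk f
        match PySem.Dict.get? fd "name", PySem.Dict.get? fd "time_level" with
        | some nm, some tl =>
          if nm = "" ∨ tl = "" then best
          else if ¬ (PySem.Dict.get? fd "role" = some "dimension" ∨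
                     PySem.Dict.get? fd "role" = some "unknown") then best
          else
            let r := PySem.Dict.getD rank tl (-1)
            match best with
            | none => some (r, tl, nm)
            | some b => if r > b.1 then some (r, tl, nm) else best
        | _, _ => best) none
      match best with
      | none => (none, none)
      | some b => (some b.2.1, some b.2.2)

-- ===== PORT B =====
-- literal port of B: build the candidate list, stable-sort by negated rank, take the head
def resolve_time_from_field_info_alt (field_info : Option (List (List (String × String)))) (time_hierarchy : List (String × List String)) : Option String × Option String :=
  -- `not field_info`: None or the empty list ("" as getD default renders Python's truthiness)
  if field_info = none ∨ field_info = some [] then (none, none)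
  else
    let fs := field_info.getD []
    let ordering := PySem.Dict.getD (PySem.Dict.mk time_hierarchy) "ordering" []
    let rank := (PySem.List.enumerate ordering).foldl
      (fun d p => PySem.Dict.insert d p.2 p.1) PySem.Dict.empty
    let candidates := fs.foldl (fun (acc : List (Int × String × String)) f =>
      let fd := PySem.Dict.mk f
      let nm := PySem.Dict.getD fd "name" ""
      let tl := PySem.Dict.getD fd "time_level" ""
      if nm = "" ∨ tl = "" then acc
      else if ¬ (PySem.Dict.get? fd "role" = some "dimension" ∨
                 PySem.Dict.get? fd "role" = some "unknown") then acc
      else acc ++ [(PySem.Dict.getD rank tl (-1), tl, nm)]) []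
    if candidates = [] then (none, none)
    else
        match PySem.List.sorted candidates (fun t => -t.1) with
        | top :: _ => (some top.2.1, some top.2.2)
        | [] => (none, none)

-- ===== PRECONDITION & SPEC =====
def Spec_resolve_time_from_field_info (field_info : Option (List (List (String × String)))) (time_hierarchy : List (String × List String)) (out : Option String × Option String) : Prop := out = resolve_time_from_field_info_alt field_info time_hierarchy
instance (field_info : Option (List (List (String × String)))) (time_hierarchy : List (String × List String)) (out : Option String × Option String) : Decidable (Spec_resolve_time_from_field_info field_info time_hierarchy out) := by unfold Spec_resolve_time_from_field_info; infer_instance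

-- ===== CLAIM (what is proved, stated in full; the proofs are below) =====
def Claim_equal_resolve_time_from_field_info : Prop := ∀ (field_info : Option (List (List (String × String)))) (time_hierarchy : List (String × List String)), Dom_resolve_time_from_field_info field_info time_hierarchy → Spec_resolve_time_from_field_info field_info time_hierarchy (resolve_time_from_field_info field_info time_hierarchy)

-- ===== LEMMAS AND PROOFS =====

-- A's running-best step, abstracted over the already-extracted candidate triples
def pvBestStep (b : Option (Int × String × String)) (x : Int × String × String) : Option (Int × String × String) :=
  match b with
  | none => some x
  | some c => if x.1 > c.1 then some x else b

-- A's per-field loop body, parametric in the rank dict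
def pvStepA (rank : PySem.Dict String Int) (best : Option (Int × String × String)) (f : List (String × String)) : Option (Int × String × String) :=
  let fd := PySem.Dict.mk f
  match PySem.Dict.get? fd "name", PySem.Dict.get? fd "time_level" with
  | some nm, some tl =>
    if nm = "" ∨ tl = "" then best
    else if ¬ (PySem.Dict.get? fd "role" = some "dimension" ∨
               PySem.Dict.get? fd "role" = some "unknown") then best
    else
      let r := PySem.Dict.getD rank tl (-1)
      match best with
      | none => some (r, tl, nm)
      | some b => if r > b.1 then some (r, tl, nm) else best
  | _, _ => best

-- B's per-field loop body
def pvStepC (rank : PySem.Dict String Int) (acc : List (Int × String × String)) (f : List (String × String)) : List (Int × String × String) :=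
  let fd := PySem.Dict.mk f
  let nm := PySem.Dict.getD fd "name" ""
  let tl := PySem.Dict.getD fd "time_level" ""
  if nm = "" ∨ tl = "" then acc
  else if ¬ (PySem.Dict.get? fd "role" = some "dimension" ∨
             PySem.Dict.get? fd "role" = some "unknown") then acc
  else acc ++ [(PySem.Dict.getD rank tl (-1), tl, nm)]

lemma pvStepC_append (rank : PySem.Dict String Int) (acc : List (Int × String × String)) (f : List (String × String)) :
    pvStepC rank acc f = acc ++ pvStepC rank [] f := by
  simp only [pvStepC]
  split_ifs <;> simp

lemma pvFoldC_acc (rank : PySem.Dict String Int) (fs : List (List (String × String))) (acc : List (Int × String × String)) :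
    fs.foldl (pvStepC rank) acc = acc ++ fs.foldl (pvStepC rank) [] := by
  induction fs generalizing acc with
  | nil => simp
  | cons f fs ih =>
    simp only [List.foldl_cons]
    rw [ih, ih (pvStepC rank [] f), pvStepC_append, List.append_assoc]

lemma pvStepA_eq (rank : PySem.Dict String Int) (b : Option (Int × String × String)) (f : List (String × String)) :
    pvStepA rank b f = (pvStepC rank [] f).foldl pvBestStep b := by
  rcases h1 : PySem.Dict.get? (PySem.Dict.mk f) "name" with _ | nm <;>
    rcases h2 : PySem.Dict.get? (PySem.Dict.mk f) "time_level" with _ | tl <;>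
      simp only [pvStepA, pvStepC, PySem.Dict.getD, h1, h2] <;>
        (split_ifs <;> cases b <;> simp_all [pvBestStep])

-- fusion: A's fold over the fields equals the best-step fold over B's candidate list
lemma pvFusion (rank : PySem.Dict String Int) (fs : List (List (String × String))) (b : Option (Int × String × String)) :
    fs.foldl (pvStepA rank) b = (fs.foldl (pvStepC rank) []).foldl pvBestStep b := by
  induction fs generalizing b with
  | nil => rfl
  | cons f fs ih =>
    simp only [List.foldl_cons]
    rw [ih, pvStepA_eq, ← List.foldl_append, ← pvFoldC_acc]

-- inserting into the stable ascending-by-(-rank) sort updates the head exactly like pvBestStep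
lemma pvHead_insertBy (x : Int × String × String) (ys : List (Int × String × String)) :
    (PySem.List.insertBy (fun a b => decide ((-a.1 : Int) < -b.1)) x ys).head? = pvBestStep ys.head? x := by
  cases ys with
  | nil => rfl
  | cons y t =>
    simp only [PySem.List.insertBy, pvBestStep, List.head?_cons]
    by_cases h : (-x.1 : Int) < -y.1
    · rw [if_pos (by simpa using h), if_pos (by omega)]
      simp
    · rw [if_neg (by simpa using h), if_neg (by omega)]
      simp

lemma pvHead_foldl_insertBy (cs : List (Int × String × String)) (acc : List (Int × String × String)) :
    (cs.foldl (fun a x => PySem.List.insertBy (fun a b => decide ((-a.1 : Int) < -b.1)) x a) acc).head?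
      = cs.foldl pvBestStep acc.head? := by
  induction cs generalizing acc with
  | nil => rfl
  | cons c cs ih =>
    simp only [List.foldl_cons]
    rw [ih, pvHead_insertBy]

-- the head of B's sorted candidate list is A's running best
lemma pvSorted_head (cs : List (Int × String × String)) :
    (PySem.List.sorted cs (fun t => -t.1)).head? = cs.foldl pvBestStep none := by
  rw [PySem.List.sorted_eq_foldl_insertBy]
  exact pvHead_foldl_insertBy cs []

lemma pvBestStep_some (b : Option (Int × String × String)) (x : Int × String × String) :
    ∃ c, pvBestStep b x = some c := by
  cases b with
  | none => exact ⟨x, rfl⟩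
  | some c =>
    simp only [pvBestStep]
    split_ifs
    · exact ⟨x, rfl⟩
    · exact ⟨c, rfl⟩

lemma pvFold_best_ne_none (cs : List (Int × String × String)) (b : Int × String × String) :
    ∃ c, cs.foldl pvBestStep (some b) = some c := by
  induction cs generalizing b with
  | nil => exact ⟨b, rfl⟩
  | cons x cs ih =>
    obtain ⟨c, hc⟩ := pvBestStep_some (some b) x
    simp only [List.foldl_cons, hc]
    exact ih c

-- ===== VERDICT (by name: the statement is the Claim_ definition above) =====
theorem resolve_time_from_field_info_spec : Claim_equal_resolve_time_from_field_info := by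
  intro field_info time_hierarchy _
  unfold Spec_resolve_time_from_field_info
  cases field_info with
  | none => rfl
  | some fs =>
    by_cases hfs : fs = []
    · subst hfs; rfl
    · set rank := (PySem.List.enumerate (PySem.Dict.getD (PySem.Dict.mk time_hierarchy) "ordering" [])).foldl
        (fun d p => PySem.Dict.insert d p.2 p.1) PySem.Dict.empty with hrank
      show (if fs = [] then ((none : Option String), (none : Option String))
            else match fs.foldl (pvStepA rank) none with
                 | none => ((none : Option String), (none : Option String))
                 | some b => (some b.2.1, some b.2.2))
          = (if some fs = none ∨ some fs = some [] then ((none : Option String), (none : Option String))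
             else if fs.foldl (pvStepC rank) [] = [] then ((none : Option String), (none : Option String))
             else match PySem.List.sorted (fs.foldl (pvStepC rank) []) (fun t => -t.1) with
                  | top :: _ => (some top.2.1, some top.2.2)
                  | [] => (none, none))
      rw [if_neg hfs, if_neg (show ¬(some fs = none ∨ some fs = some []) by simp [hfs]),
          pvFusion rank fs none]
      cases hcs : fs.foldl (pvStepC rank) [] with
      | nil => simp
      | cons c cs =>
        have hhead := pvSorted_head (c :: cs)
        obtain ⟨b, hb⟩ : ∃ b, (c :: cs).foldl pvBestStep none = some b := by
          simpa [pvBestStep] using pvFold_best_ne_none cs c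
        rw [hb] at hhead ⊢
        simp only [if_neg (by simp : ¬(c :: cs = ([] : List (Int × String × String))))]
        cases hs : PySem.List.sorted (c :: cs) (fun t => -t.1) with
        | nil => rw [hs] at hhead; simp at hhead
        | cons top rest =>
          rw [hs] at hhead
          simp only [List.head?_cons, Option.some.injEq] at hhead
          rw [hhead]
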